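-- pv_equiv track=rewrite | github.com/dendaxD/QAOA-MaxCut-amplitudes | thesis-deadline-version/rings/exp_decay/odd-rings-exp-pokles-mathematica.py | label
-- ===== SOURCE A (Python) =====
-- def label(state):
-- 	label = []
-- 	value = state[0]
-- 	repetition = 0
-- 	for i in range(len(state)+1):
-- 		if state[i%len(state)] == value:
-- 			if i == len(state):
-- 				if len(label) == 0:
-- 					label.append('0')
-- 				label[0] = str( int(label[0]) + repetition)
-- 			repetition += 1
-- 		else:
-- 			label.append(str(repetition))
-- 			repetition = 1
-- 			value = state[i%len(state)]
-- 	return label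
-- ===== SOURCE B (Python) =====
-- def label(state):
--     n = len(state)
--     first = state[0]
--     cuts = [i for i in range(1, n) if state[i] != state[i - 1]]
--     if not cuts:
--         return [str(n)]
--     counts = [b - a for a, b in zip(cuts, cuts[1:])]
--     if first == state[-1]:
--         counts = [cuts[0] + (n - cuts[-1])] + counts
--     else:
--         counts = [cuts[0]] + counts + [n - cuts[-1]]
--     return [str(c) for c in counts]
-- ===== Notes on version B (the rewrite author's own statement) =====
-- stated objective: alternative
-- what changed: B never counts repetitions at all: it collects the boundary positions where adjacent entries differ (a filtered index range), then derives every run length arithmetically as a difference of consecutive boundaries, handling the cyclic wrap by adding the head and tail segments when the endpoints match; A instead runs one fused modular-index scan maintaining a running repetition counter and patching the first label entry by parsing it back with int().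
import Mathlib
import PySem

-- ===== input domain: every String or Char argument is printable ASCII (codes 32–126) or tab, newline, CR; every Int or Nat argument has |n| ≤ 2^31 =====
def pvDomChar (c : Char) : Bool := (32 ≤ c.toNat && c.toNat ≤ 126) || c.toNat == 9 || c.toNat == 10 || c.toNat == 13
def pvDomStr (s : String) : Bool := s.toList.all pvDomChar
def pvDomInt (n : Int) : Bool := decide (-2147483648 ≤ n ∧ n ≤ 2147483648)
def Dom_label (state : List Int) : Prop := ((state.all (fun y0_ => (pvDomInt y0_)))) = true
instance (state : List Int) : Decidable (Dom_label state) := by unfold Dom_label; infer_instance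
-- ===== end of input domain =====

-- B replaces A's fused counting scan by boundary positions: it filters the indices where
-- adjacent entries differ and obtains each run length as a difference of consecutive
-- boundaries, with one arithmetic wrap merge (objective: alternative, same cost).

-- ===== PORT A =====
def label (state : List Int) : List String :=
  ((PySem.List.pyRange 0 ((state.length : Int) + 1) 1).foldl
    (fun (st : List String × Int × Int) i =>
      if PySem.List.pyGetD state (PySem.Int.mod i (state.length : Int)) 0 = st.2.1 then
        if i = (state.length : Int) then
          let lab := if st.1.length = 0 then st.1 ++ ["0"] else st.1
          -- int(label[0]): the string always parses here, `.getD 0` is the total form of the Option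
          (PySem.List.pySetD lab 0
            (PySem.Int.toStr ((PySem.Int.ofStr? (PySem.List.pyGetD lab 0 "")).getD 0 + st.2.2)),
           st.2.1, st.2.2 + 1)
        else (st.1, st.2.1, st.2.2 + 1)
      else (st.1 ++ [PySem.Int.toStr st.2.2],
            PySem.List.pyGetD state (PySem.Int.mod i (state.length : Int)) 0, 1))
    ([], PySem.List.pyGetD state 0 0, 0)).1

-- ===== PORT B =====
def label_alt (state : List Int) : List String :=
  let n : Int := (state.length : Int)
  let first := PySem.List.pyGetD state 0 0   -- first element; the empty input is outside Pre_
  let cuts := (PySem.List.pyRange 1 n 1).filter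
    (fun i => !(PySem.List.pyGetD state i 0 == PySem.List.pyGetD state (i - 1) 0))
  if cuts = [] then [PySem.Int.toStr n]
  else
    let counts := (cuts.zip (cuts.drop 1)).map (fun p => p.2 - p.1)
    let counts' := if first = PySem.List.pyGetD state (-1) 0 then
        (cuts.headD 0 + (n - cuts.getLastD 0)) :: counts
      else (cuts.headD 0 :: counts) ++ [n - cuts.getLastD 0]
    counts'.map (fun c => PySem.Int.toStr c)

-- ===== PRECONDITION & SPEC =====
-- Pre_ excludes only the empty list, where both A and B raise IndexError indexing the first element.
def Pre_label (state : List Int) : Prop := state ≠ []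
instance (state : List Int) : Decidable (Pre_label state) := by unfold Pre_label; infer_instance
def pvWitness_label : List Int := [1, 1, 2]

def Spec_label (state : List Int) (out : List String) : Prop := out = label_alt state
instance (state : List Int) (out : List String) : Decidable (Spec_label state out) := by
  unfold Spec_label; infer_instance

-- ===== CLAIM (what is proved, stated in full; the proofs are below) =====
def Claim_equal_label : Prop :=
  ∀ (state : List Int), Dom_label state → Pre_label state → Spec_label state (label state)

-- ===== LEMMAS AND PROOFS =====

-- ---- str(int)/int(str) roundtrip: PySem.Int.ofStr? (PySem.Int.toStr n) = some n for 0 ≤ n ----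

lemma pv_digit_not_space (c : Char) (h : c.isDigit = true) : PySem.Int.isIntSpace c = false := by
  simp only [Char.isDigit, decide_eq_true_eq, Bool.and_eq_true] at h
  simp only [PySem.Int.isIntSpace, Bool.or_eq_false_iff, decide_eq_false_iff_not]
  refine ⟨⟨⟨⟨⟨?_,?_⟩,?_⟩,?_⟩,?_⟩,?_⟩ <;> rintro rfl <;> simp_all

lemma pv_dropWhile_digits (cs : List Char) (hdig : ∀ c ∈ cs, c.isDigit = true) :
    cs.dropWhile PySem.Int.isIntSpace = cs := by
  cases cs with
  | nil => rfl
  | cons c t => rw [List.dropWhile_cons_of_neg]; simp [pv_digit_not_space c (hdig c (by simp))]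

def pvDigs (n : Nat) : List Char :=
  if h : n < 10 then [Nat.digitChar (n % 10)]
  else pvDigs (n / 10) ++ [Nat.digitChar (n % 10)]
decreasing_by exact Nat.div_lt_self (by omega) (by omega)

def pvPush (ds : List Char) (a : Nat) : Nat :=
  ds.foldl (fun a c => a * 10 + (c.toNat - '0'.toNat)) a

lemma pv_digitChar_isDigit (k : Nat) (h : k < 10) : (Nat.digitChar k).isDigit = true := by
  interval_cases k <;> decide

lemma pv_digitChar_val (k : Nat) (h : k < 10) : (Nat.digitChar k).toNat - 48 = k := by
  interval_cases k <;> decide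

lemma pvDigs_ne_nil (n : Nat) : pvDigs n ≠ [] := by
  rw [pvDigs]; split <;> simp

lemma pvDigs_digits (n : Nat) : ∀ c ∈ pvDigs n, c.isDigit = true := by
  induction n using Nat.strong_induction_on with
  | _ n ih =>
    rw [pvDigs]
    have hm : n % 10 < 10 := Nat.mod_lt _ (by omega)
    split
    · simpa using pv_digitChar_isDigit _ hm
    · intro c hc
      rcases List.mem_append.mp hc with h | h
      · exact ih (n / 10) (Nat.div_lt_self (by omega) (by omega)) c h
      · simpa using (List.mem_singleton.mp h) ▸ pv_digitChar_isDigit _ hm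

lemma pvPush_pvDigs (n : Nat) : ∀ a, pvPush (pvDigs n) a = a * 10 ^ (pvDigs n).length + n := by
  induction n using Nat.strong_induction_on with
  | _ n ih =>
    intro a
    rw [pvDigs]
    have hm : n % 10 < 10 := Nat.mod_lt _ (by omega)
    split
    · next h =>
      have := pv_digitChar_val (n % 10) hm
      simp only [pvPush, List.foldl_cons, List.foldl_nil, List.length_singleton, pow_one]
      rw [Nat.mod_eq_of_lt h] at this ⊢
      rw [show '0'.toNat = 48 from rfl]
      omega
    · next h =>
      have hlt := Nat.div_lt_self (show 0 < n by omega) (show 1 < 10 by omega)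
      simp only [pvPush, List.foldl_append, List.foldl_cons, List.foldl_nil, List.length_append,
        List.length_singleton]
      rw [show (pvDigs (n/10)).foldl (fun a c => a * 10 + (c.toNat - '0'.toNat)) a = pvPush (pvDigs (n/10)) a from rfl]
      rw [ih (n/10) hlt a, pow_succ]
      have h2 := pv_digitChar_val (n % 10) hm
      have := Nat.div_add_mod n 10
      rw [show '0'.toNat = 48 from rfl]
      ring_nf
      omega

-- the integer parser's digit loop is private inside PySem; capture it (and its defining
-- equations, all `rfl`) through an existential
lemma pv_parse_exists : ∃ G : List Char → Option Nat, ∃ F : List Char → Bool → Nat → Option Nat,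
    (∀ cs : List Char,
        PySem.Int.ofChars? cs =
          (match (((cs.dropWhile PySem.Int.isIntSpace).reverse.dropWhile PySem.Int.isIntSpace).reverse : List Char) with
           | '-' :: ds => Option.map (fun n => -n) ((G ds).bind (fun a => pure ((a : Nat) : Int)))
           | '+' :: ds => Option.map (fun n => n) ((G ds).bind (fun a => pure ((a : Nat) : Int)))
           | ds => Option.map (fun n => n) ((G ds).bind (fun a => pure ((a : Nat) : Int))))) ∧
    (G = (fun x => match x with | [] => none | cs => F cs false 0)) ∧
    (∀ b acc, F [] b acc = if b = true then some acc else none) ∧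
    (∀ c rest b acc, F (c :: rest) b acc =
      if c.isDigit = true then F rest true (acc * 10 + (c.toNat - '0'.toNat))
      else if c = '_' ∧ b = true then
        (match rest with
         | d :: _ => if d.isDigit = true then F rest false acc else none
         | [] => none)
      else none) :=
  ⟨_, _, fun _ => rfl, rfl, fun _ _ => rfl, fun _ _ _ _ => rfl⟩

lemma pv_ofChars_digits (cs : List Char) (hne : cs ≠ []) (hdig : ∀ c ∈ cs, c.isDigit = true) :
    PySem.Int.ofChars? cs = some ((pvPush cs 0 : Nat) : Int) := by
  obtain ⟨G, F, h1, hG, hF0, hFc⟩ := pv_parse_exists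
  have key : ∀ ds acc, (∀ c ∈ ds, c.isDigit = true) → F ds true acc = some (pvPush ds acc) := by
    intro ds
    induction ds with
    | nil => intro acc _; rw [hF0]; simp [pvPush]
    | cons c t iht =>
      intro acc hd
      rw [hFc, if_pos (hd c (by simp)), iht _ (fun x hx => hd x (by simp [hx]))]
      rfl
  rw [h1 cs, pv_dropWhile_digits cs hdig,
    pv_dropWhile_digits cs.reverse (fun c hc => hdig c (List.mem_reverse.mp hc)),
    List.reverse_reverse]
  cases cs with
  | nil => exact absurd rfl hne
  | cons c t =>
    have hc := hdig c (by simp)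
    split
    · next ds heq => injection heq with e1 e2; subst e1; exact absurd hc (by decide)
    · next ds heq => injection heq with e1 e2; subst e1; exact absurd hc (by decide)
    · next =>
      rw [hG]
      show Option.map (fun n => n) ((F (c :: t) false 0).bind (fun a => pure ((a : Nat) : Int))) = _
      rw [hFc, if_pos hc, key _ _ (fun x hx => hdig x (by simp [hx]))]
      rfl

lemma pv_core (f : Nat) : ∀ (n : Nat) (ds : List Char), n < f →
    Nat.toDigitsCore 10 f n ds = pvDigs n ++ ds := by
  induction f with
  | zero => omega
  | succ f ihf =>
    intro n ds h
    rw [Nat.toDigitsCore.eq_def]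
    simp only []
    by_cases h0 : n / 10 = 0
    · rw [if_pos h0, pvDigs, dif_pos (by omega)]
      rfl
    · rw [if_neg h0, ihf (n / 10) _ (by omega)]
      conv_rhs => rw [pvDigs, dif_neg (by omega)]
      simp

lemma pv_roundtrip (n : Int) (h : 0 ≤ n) : PySem.Int.ofStr? (PySem.Int.toStr n) = some n := by
  rw [PySem.Int.toStr.eq_1, PySem.Int.ofStr?_ofList]
  have htc : PySem.Int.toChars n = pvDigs n.toNat := by
    rw [PySem.Int.toChars, if_neg (by omega), Nat.toDigits]
    rw [show Nat.toDigitsCore 10 (n.toNat + 1) n.toNat [] = pvDigs n.toNat ++ [] from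
      pv_core (n.toNat + 1) n.toNat [] (by omega)]
    simp
  rw [htc, pv_ofChars_digits _ (pvDigs_ne_nil _) (pvDigs_digits _)]
  rw [pvPush_pvDigs]
  simp [Int.toNat_of_nonneg h]

-- ---- the two loop bodies, element-level ----

def pvF (g : Int × Int) : String := PySem.Int.toStr g.2

def pvB (gs : List (Int × Int)) (v : Int) : List (Int × Int) :=
  match gs.getLast? with
  | some g => if g.1 = v then gs.dropLast ++ [(g.1, g.2 + 1)] else gs ++ [(v, 1)]
  | none => [(v, 1)]

def pvA (st : List String × Int × Int) (x : Int) : List String × Int × Int :=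
  if x = st.2.1 then (st.1, st.2.1, st.2.2 + 1) else (st.1 ++ [PySem.Int.toStr st.2.2], x, 1)

def pvMerge (groups : List (Int × Int)) : List (Int × Int) :=
  if 1 < groups.length ∧ (groups.headD (0, 0)).1 = (groups.getLastD (0, 0)).1 then
    match groups with
    | [] => []
    | g0 :: rest => (g0.1, g0.2 + (groups.getLastD (0, 0)).2) :: rest.dropLast
  else groups

lemma pv_eq_dropLast_concat {α : Type} (L : List α) (l : α) (h : L.getLast? = some l) :
    L = L.dropLast ++ [l] := by
  have hne : L ≠ [] := by rintro rfl; simp at h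
  rw [List.getLast?_eq_some_getLast hne] at h
  rw [← Option.some_inj.mp h]
  exact (List.dropLast_append_getLast hne).symm

-- loop invariant: B-style group list determines A's loop state
lemma pv_fold_rel (xs : List Int) : ∀ (g0 : Int × Int) (gr : List (Int × Int)) (lab : List String)
    (value rep : Int),
    lab = ((g0 :: gr).dropLast).map pvF →
    (g0 :: gr).getLast? = some (value, rep) →
    1 ≤ g0.2 →
    ∃ (g0' : Int × Int) (gr' : List (Int × Int)) (value' rep' : Int),
      xs.foldl pvB (g0 :: gr) = g0' :: gr' ∧
      xs.foldl pvA (lab, value, rep) = (((g0' :: gr').dropLast).map pvF, value', rep') ∧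
      (g0' :: gr').getLast? = some (value', rep') ∧
      g0'.1 = g0.1 ∧ 1 ≤ g0'.2 := by
  induction xs with
  | nil =>
    intro g0 gr lab value rep hlab hlast hcnt
    exact ⟨g0, gr, value, rep, rfl, by simp [hlab], hlast, rfl, hcnt⟩
  | cons x xs ih =>
    intro g0 gr lab value rep hlab hlast hcnt
    simp only [List.foldl_cons]
    have hBstep : pvB (g0 :: gr) x =
        if value = x then (g0 :: gr).dropLast ++ [(value, rep + 1)] else (g0 :: gr) ++ [(x, 1)] := by
      simp [pvB, hlast]
    by_cases hx : x = value
    · subst hx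
      rw [if_pos rfl] at hBstep
      have hAstep : pvA (lab, x, rep) x = (lab, x, rep + 1) := by simp [pvA]
      rw [hAstep, hBstep]
      cases gr with
      | nil =>
        have hg0 : g0 = (x, rep) := by simpa using hlast
        have h1 : ((g0 : Int × Int) :: ([] : List (Int × Int))).dropLast ++ [(x, rep + 1)]
            = (x, rep + 1) :: ([] : List (Int × Int)) := by simp
        rw [h1]
        obtain ⟨g0', gr', v', r', ha, hb, hc, hd, he⟩ :=
          ih (x, rep + 1) [] lab x (rep + 1) (by simp [hlab]) (by simp)
            (by have := hg0 ▸ hcnt; simp at this ⊢; omega)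
        exact ⟨g0', gr', v', r', ha, hb, hc, by rw [hd, hg0], he⟩
      | cons h1 t1 =>
        have hsh : (g0 :: h1 :: t1).dropLast ++ [(x, rep + 1)]
            = g0 :: ((h1 :: t1).dropLast ++ [(x, rep + 1)]) := by simp
        rw [hsh]
        refine ih g0 ((h1 :: t1).dropLast ++ [(x, rep + 1)]) lab x (rep + 1) ?_ ?_ hcnt
        · rw [hlab]
          have : (g0 :: ((h1 :: t1).dropLast ++ [(x, rep + 1)])).dropLast
              = g0 :: (h1 :: t1).dropLast := by
            rw [List.dropLast_cons_of_ne_nil (by simp), List.dropLast_concat]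
          rw [this]
          simp
        · rw [show (g0 : Int × Int) :: ((h1 :: t1).dropLast ++ [(x, rep + 1)])
              = (g0 :: (h1 :: t1).dropLast) ++ [(x, rep + 1)] by simp, List.getLast?_concat]
    · rw [if_neg (fun e => hx e.symm)] at hBstep
      have hAstep : pvA (lab, value, rep) x = (lab ++ [PySem.Int.toStr rep], x, 1) := by
        simp [pvA, hx]
      rw [hAstep, hBstep]
      have hsh : (g0 :: gr) ++ [(x, 1)] = g0 :: (gr ++ [(x, 1)]) := by simp
      rw [hsh]
      refine ih g0 (gr ++ [(x, 1)]) _ x 1 ?_ ?_ hcnt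
      · have hdec := pv_eq_dropLast_concat _ _ hlast
        have : (g0 :: (gr ++ [(x, 1)])).dropLast = g0 :: gr := by
          rw [show (g0 :: (gr ++ [(x, 1)])) = (g0 :: gr) ++ [(x, 1)] by simp, List.dropLast_concat]
        rw [this, hlab]
        conv_rhs => rw [hdec]
        simp [pvF]
      · rw [show (g0 :: (gr ++ [(x, 1)])) = (g0 :: gr) ++ [(x, 1)] by simp, List.getLast?_concat]

-- A's scan computes the merged group list
lemma pv_label_eq_groups (state : List Int) (hpre : state ≠ []) :
    label state = (pvMerge (state.foldl pvB [])).map pvF := by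
  cases state with
  | nil => exact absurd rfl hpre
  | cons s0 rest =>
    have hlen : (0:Int) < ((s0 :: rest).length : Int) := by simp
    unfold label
    rw [PySem.List.pyRange_one_succ_right (le_of_lt hlen)]
    rw [List.foldl_append]
    rw [PySem.List.foldl_congr_mem (PySem.List.pyRange 0 ((s0 :: rest).length : Int)) _
      (fun (st : List String × Int × Int) i => pvA st (PySem.List.pyGetD (s0 :: rest) i 0)) _ ?hcg]
    case hcg =>
      intro acc x hx
      rcases PySem.List.mem_pyRange_one.mp hx with ⟨hx0, hx1⟩
      have hmod : PySem.Int.mod x ((s0 :: rest).length : Int) = x := by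
        rw [PySem.Int.mod_eq_emod_of_pos hlen]; exact Int.emod_eq_of_lt hx0 hx1
      rw [hmod]
      by_cases hc : PySem.List.pyGetD (s0 :: rest) x 0 = acc.2.1
      · rw [if_pos hc, if_neg (by omega)]
        simp [pvA, hc]
      · rw [if_neg hc]
        simp [pvA, hc]
    rw [PySem.List.foldl_pyRange_zero_pyGetD' (s0 :: rest) 0 pvA
      ([], PySem.List.pyGetD (s0 :: rest) 0 0, 0)]
    rw [PySem.List.pyGetD_zero_cons]
    rw [show List.foldl pvA ([], s0, 0) (s0 :: rest) = List.foldl pvA ([], s0, 1) rest by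
      simp [pvA]]
    rw [show List.foldl pvB [] (s0 :: rest) = List.foldl pvB [(s0, 1)] rest by simp [pvB]]
    obtain ⟨g0', gr', v', r', hgs, hst, hlast, hhead, hcnt⟩ :=
      pv_fold_rel rest (s0, 1) [] [] s0 1 (by simp) (by simp) (by simp)
    rw [hgs, hst]
    simp only [List.foldl_cons, List.foldl_nil]
    have hmod : PySem.Int.mod ((s0 :: rest).length : Int) ((s0 :: rest).length : Int) = 0 := by
      rw [PySem.Int.mod_eq_emod_of_pos hlen, Int.emod_self]
    rw [hmod, PySem.List.pyGetD_zero_cons]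
    simp only [if_true]
    by_cases hb : s0 = v'
    · rw [if_pos hb]
      cases gr' with
      | nil =>
        have hg0 : g0' = (v', r') := by simpa using hlast
        rw [show (if (List.map pvF [g0'].dropLast).length = 0 then
            List.map pvF [g0'].dropLast ++ ["0"] else List.map pvF [g0'].dropLast) = ["0"] by simp]
        rw [PySem.List.pyGetD_zero_cons]
        rw [show PySem.Int.ofStr? "0" = some 0 by decide]
        simp only [Option.getD_some, zero_add]
        rw [PySem.List.pySetD_of_nonneg _ _ (by omega)]
        simp [pvMerge, pvF, hg0]
      | cons h1 t1 =>
        have hdl : (g0' :: h1 :: t1).dropLast = g0' :: (h1 :: t1).dropLast := by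
          rw [List.dropLast_cons_of_ne_nil (by simp)]
        rw [hdl]
        simp only [List.map_cons, List.length_cons, Nat.succ_ne_zero, if_false]
        rw [PySem.List.pyGetD_zero_cons]
        rw [show pvF g0' = PySem.Int.toStr g0'.2 from rfl]
        rw [pv_roundtrip g0'.2 (by omega)]
        simp only [Option.getD_some]
        rw [PySem.List.pySetD_of_nonneg _ _ (by omega)]
        have hmg : pvMerge (g0' :: h1 :: t1) = (g0'.1, g0'.2 + r') :: (h1 :: t1).dropLast := by
          rw [pvMerge, if_pos]
          · rw [List.getLastD_eq_getLast?, hlast]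
            simp
          · constructor
            · simp
            · rw [List.getLastD_eq_getLast?, hlast]
              simp only [List.headD_cons, Option.getD_some]
              have : g0'.1 = s0 := by simpa using hhead
              exact this.trans hb
        rw [hmg]
        simp [pvF]
    · rw [if_neg hb]
      have hgseq := pv_eq_dropLast_concat _ _ hlast
      have hmg : pvMerge (g0' :: gr') = g0' :: gr' := by
        rw [pvMerge, if_neg]
        rintro ⟨h1, h2⟩
        rw [List.getLastD_eq_getLast?, hlast] at h2
        simp only [List.headD_cons, Option.getD_some] at h2
        have hh : g0'.1 = s0 := by simpa using hhead
        exact hb (hh.symm.trans h2)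
      rw [hmg]
      conv_rhs => rw [hgseq]
      simp [pvF]

-- ---- B-side characterisation: cuts, consecutive differences, counts ----

def pvDiffs : List Int → List Int
  | a :: b :: t => (b - a) :: pvDiffs (b :: t)
  | _ => []

def pvCutsFn (s : List Int) : List Int :=
  (PySem.List.pyRange 1 (s.length : Int) 1).filter
    (fun i => !(PySem.List.pyGetD s i 0 == PySem.List.pyGetD s (i - 1) 0))

def pvCounts (cuts : List Int) (n : Int) : List Int :=
  match cuts with
  | [] => [n]
  | c0 :: cs => c0 :: (pvDiffs (c0 :: cs) ++ [n - (c0 :: cs).getLastD 0])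

lemma pv_zip_diffs (l : List Int) :
    (l.zip (l.drop 1)).map (fun p => p.2 - p.1) = pvDiffs l := by
  match l with
  | [] => rfl
  | [a] => rfl
  | a :: b :: t =>
    simp only [List.drop_one, List.tail_cons, List.zip_cons_cons, List.map_cons, pvDiffs]
    rw [← pv_zip_diffs (b :: t)]
    simp

lemma pv_diffs_concat (l : List Int) (hl : l ≠ []) (m : Int) :
    pvDiffs (l ++ [m]) = pvDiffs l ++ [m - l.getLastD 0] := by
  match l with
  | [a] => simp [pvDiffs]
  | a :: b :: t =>
    have := pv_diffs_concat (b :: t) (by simp) m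
    simp only [List.cons_append, pvDiffs] at this ⊢
    rw [this]
    simp

lemma pv_getD_append_lt (xs : List Int) (x : Int) (i : Int) (h0 : 0 ≤ i)
    (h1 : i < (xs.length : Int)) :
    PySem.List.pyGetD (xs ++ [x]) i 0 = PySem.List.pyGetD xs i 0 := by
  rw [PySem.List.pyGetD_eq_getElem _ _ h0 (by simp; omega),
    PySem.List.pyGetD_eq_getElem _ _ h0 (by simpa using h1),
    List.getElem_append_left (by omega)]

lemma pv_cuts_concat (xs : List Int) (hxs : xs ≠ []) (x : Int) :
    pvCutsFn (xs ++ [x]) = pvCutsFn xs ++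
      (if x = xs.getLastD 0 then [] else [(xs.length : Int)]) := by
  have hlen : (1 : Int) ≤ (xs.length : Int) := by
    have := List.length_pos_iff.mpr hxs; omega
  unfold pvCutsFn
  rw [show ((xs ++ [x]).length : Int) = (xs.length : Int) + 1 by simp,
    PySem.List.pyRange_one_succ_right hlen, List.filter_append]
  congr 1
  · apply List.filter_congr
    intro i hi
    rcases PySem.List.mem_pyRange_one.mp hi with ⟨hi1, hi2⟩
    rw [pv_getD_append_lt _ _ _ (by omega) hi2, pv_getD_append_lt _ _ _ (by omega) (by omega)]
  · have hx1 : PySem.List.pyGetD (xs ++ [x]) (xs.length : Int) 0 = x := by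
      rw [PySem.List.pyGetD_eq_getElem _ _ (by omega) (by simp)]
      simp
    have hx2 : PySem.List.pyGetD (xs ++ [x]) ((xs.length : Int) - 1) 0 = xs.getLastD 0 := by
      rw [PySem.List.pyGetD_eq_getElem _ _ (by omega) (by simp),
        List.getElem_append_left (by omega)]
      rw [List.getLastD_eq_getLast?, List.getLast?_eq_some_getLast hxs, Option.getD_some,
        List.getLast_eq_getElem]
      congr 1
      omega
    simp only [List.filter_cons, List.filter_nil, hx1, hx2]
    by_cases hx : x = xs.getLastD 0
    · simp [hx]
    · simp

lemma pvCounts_succ (cuts : List Int) (n c : Int)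
    (h : (pvCounts cuts n).getLast? = some c) :
    pvCounts cuts (n + 1) = (pvCounts cuts n).dropLast ++ [c + 1] := by
  cases cuts with
  | nil =>
    simp only [pvCounts, List.getLast?_singleton, Option.some_inj] at h
    simp [pvCounts, h]
  | cons c0 cs =>
    simp only [pvCounts] at h ⊢
    rw [show (c0 : Int) :: (pvDiffs (c0 :: cs) ++ [n - (c0 :: cs).getLastD 0])
        = ((c0 :: pvDiffs (c0 :: cs)) ++ [n - (c0 :: cs).getLastD 0]) by simp] at h ⊢
    rw [List.getLast?_concat, Option.some_inj] at h
    rw [List.dropLast_concat, show n + 1 - (c0 :: cs).getLastD 0 = c + 1 by omega]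
    simp

lemma pvCounts_cut (cuts : List Int) (n : Int) :
    pvCounts (cuts ++ [n]) (n + 1) = pvCounts cuts n ++ [1] := by
  cases cuts with
  | nil => simp [pvCounts, pvDiffs]
  | cons c0 cs =>
    have hd := pv_diffs_concat (c0 :: cs) (by simp) n
    have hL : ((c0 :: (cs ++ [n]) : List Int)).getLastD 0 = n := by
      rw [show (c0 :: (cs ++ [n]) : List Int) = (c0 :: cs) ++ [n] by simp,
        List.getLastD_eq_getLast?, List.getLast?_concat]
      rfl
    simp only [List.cons_append, pvCounts]
    rw [show (pvDiffs (c0 :: (cs ++ [n])) : List Int) = pvDiffs ((c0 :: cs) ++ [n]) by simp,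
      hd, hL, show n + 1 - n = (1 : Int) by ring]

lemma pv_cons_dropLast_concat {α : Type} (a : α) (l : List α) (hl : l ≠ []) (z : α) :
    (a :: l).dropLast ++ [z] = a :: (l.dropLast ++ [z]) := by
  rw [List.dropLast_cons_of_ne_nil hl]
  simp

-- invariant: the group list's counts are exactly the counts the cut positions determine
lemma pv_groups_cuts (s : List Int) (hs : s ≠ []) :
    ∃ (G0 : Int × Int) (Gr : List (Int × Int)) (v c : Int),
      s.foldl pvB [] = G0 :: Gr ∧ (G0 :: Gr).getLast? = some (v, c) ∧
      G0.1 = s.headD 0 ∧ v = s.getLastD 0 ∧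
      (G0 :: Gr).map Prod.snd = pvCounts (pvCutsFn s) (s.length : Int) := by
  induction s using List.reverseRecOn with
  | nil => exact absurd rfl hs
  | append_singleton xs x ih =>
    cases xs with
    | nil =>
      refine ⟨(x, 1), [], x, 1, by simp [pvB], by simp, by simp, by simp, ?_⟩
      have hc : pvCutsFn [x] = [] := by
        unfold pvCutsFn
        rw [show (([x] : List Int).length : Int) = 1 by simp, PySem.List.pyRange_one_eq_nil le_rfl]
        rfl
      simp [hc, pvCounts]
    | cons y ys =>
      obtain ⟨G0, Gr, v, c, hfold, hlast, hhead, hv, hcounts⟩ := ih (by simp)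
      have hxs : (y :: ys : List Int) ≠ [] := by simp
      have hfold' : ((y :: ys) ++ [x]).foldl pvB [] = pvB (G0 :: Gr) x := by
        rw [List.foldl_append, hfold]; rfl
      have hcuts := pv_cuts_concat (y :: ys) hxs x
      have hvlast : v = (y :: ys).getLastD 0 := hv
      have hlen1 : (((y :: ys) ++ [x]).length : Int) = ((y :: ys).length : Int) + 1 := by simp
      have hlastx : (y :: (ys ++ [x]) : List Int).getLastD 0 = x := by
        rw [show (y :: (ys ++ [x]) : List Int) = (y :: ys) ++ [x] by simp,
          List.getLastD_eq_getLast?, List.getLast?_concat]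
        rfl
      have hBstep : pvB (G0 :: Gr) x =
          if v = x then (G0 :: Gr).dropLast ++ [(v, c + 1)] else (G0 :: Gr) ++ [(x, 1)] := by
        simp [pvB, hlast]
      by_cases hx : x = v
      · -- same value: last group grows, cut list unchanged
        rw [if_pos hx.symm] at hBstep
        rw [hvlast] at hx
        rw [if_pos hx] at hcuts
        have hclast : (pvCounts (pvCutsFn (y :: ys)) ((y :: ys).length : Int)).getLast? = some c := by
          rw [← hcounts, List.getLast?_map, hlast]; rfl
        have hstep := pvCounts_succ (pvCutsFn (y :: ys)) ((y :: ys).length : Int) c hclast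
        cases Gr with
        | nil =>
          have hg0 : G0 = (v, c) := by simpa using hlast
          refine ⟨(v, c + 1), [], v, c + 1, by rw [hfold', hBstep]; simp, by simp, ?_, ?_, ?_⟩
          · have h2 : v = y := by
              have h3 := hhead
              rw [hg0] at h3
              simpa using h3
            simpa using h2
          · simpa using (by rw [hlastx, hx]; exact hvlast : v = (y :: (ys ++ [x]) : List Int).getLastD 0)
          · rw [hcuts, List.append_nil, hlen1, hstep, ← hcounts, hg0]
            simp
        | cons h1 t1 =>
          refine ⟨G0, (h1 :: t1).dropLast ++ [(v, c + 1)], v, c + 1, ?_, ?_, ?_, ?_, ?_⟩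
          · rw [hfold', hBstep, List.dropLast_cons_of_ne_nil (by simp)]
            rfl
          · rw [show (G0 :: ((h1 :: t1).dropLast ++ [(v, c + 1)]))
                = (G0 :: (h1 :: t1).dropLast) ++ [(v, c + 1)] by simp, List.getLast?_concat]
          · simpa using hhead
          · simpa using (by rw [hlastx, hx]; exact hvlast : v = (y :: (ys ++ [x]) : List Int).getLastD 0)
          · rw [hcuts, List.append_nil, hlen1, hstep, ← hcounts]
            simp only [List.map_cons, List.map_append, List.map_dropLast, List.map_nil]
            rw [pv_cons_dropLast_concat G0.2 (h1.2 :: List.map Prod.snd t1) (by simp) (c + 1)]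
      · -- new value: a fresh group and a fresh cut
        rw [if_neg (fun e => hx e.symm)] at hBstep
        rw [hvlast] at hx
        rw [if_neg hx] at hcuts
        refine ⟨G0, Gr ++ [(x, 1)], x, 1, ?_, ?_, ?_, by simpa using (by rw [hlastx] : x = (y :: (ys ++ [x]) : List Int).getLastD 0), ?_⟩
        · rw [hfold', hBstep]; rfl
        · rw [show (G0 :: (Gr ++ [(x, 1)])) = (G0 :: Gr) ++ [(x, 1)] by simp,
            List.getLast?_concat]
        · simpa using hhead
        · rw [hcuts, hlen1, pvCounts_cut _ _, ← hcounts]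
          simp

lemma pv_label_alt_char (state : List Int) :
    label_alt state =
      (if pvCutsFn state = [] then [PySem.Int.toStr (state.length : Int)]
       else
         (if PySem.List.pyGetD state 0 0 = PySem.List.pyGetD state (-1) 0 then
            ((pvCutsFn state).headD 0 + ((state.length : Int) - (pvCutsFn state).getLastD 0)) ::
              ((pvCutsFn state).zip ((pvCutsFn state).drop 1)).map (fun p => p.2 - p.1)
          else ((pvCutsFn state).headD 0 ::
              ((pvCutsFn state).zip ((pvCutsFn state).drop 1)).map (fun p => p.2 - p.1)) ++
            [(state.length : Int) - (pvCutsFn state).getLastD 0]).map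
          (fun c => PySem.Int.toStr c)) := rfl

lemma pv_map_pvF (l : List (Int × Int)) :
    l.map pvF = (l.map Prod.snd).map (fun c => PySem.Int.toStr c) := by
  rw [List.map_map]; rfl

lemma pv_groups_eq_alt (state : List Int) (hpre : state ≠ []) :
    (pvMerge (state.foldl pvB [])).map pvF = label_alt state := by
  obtain ⟨G0, Gr, v, c, hfold, hlast, hhead, hv, hcounts⟩ := pv_groups_cuts state hpre
  have hgd0 : PySem.List.pyGetD state 0 0 = state.headD 0 := by
    cases state with
    | nil => exact absurd rfl hpre
    | cons a t => simp [PySem.List.pyGetD_zero_cons]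
  have hgdneg : PySem.List.pyGetD state (-1) 0 = state.getLastD 0 := by
    rw [PySem.List.pyGetD_neg_one state 0 hpre, List.getLastD_eq_getLast?,
      List.getLast?_eq_some_getLast hpre, Option.getD_some]
  rw [hfold, pv_label_alt_char, pv_zip_diffs, hgd0, hgdneg]
  cases hc : pvCutsFn state with
  | nil =>
    rw [hc] at hcounts
    cases Gr with
    | nil =>
      simp only [pvCounts, List.map_cons, List.map_nil, List.cons.injEq, and_true] at hcounts
      rw [if_pos rfl]
      simp [pvMerge, pvF, hcounts]
    | cons h1 t1 => simp [pvCounts] at hcounts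
  | cons c0 cs =>
    rw [hc] at hcounts
    rw [if_neg (by simp)]
    cases Gr with
    | nil => simp [pvCounts] at hcounts
    | cons h1 t1 =>
      have hGlast : ((G0 :: h1 :: t1).getLastD (0, 0)) = (v, c) := by
        rw [List.getLastD_eq_getLast?, hlast]; rfl
      have hGhead : ((G0 :: h1 :: t1).headD (0, 0)).1 = state.headD 0 := hhead
      have hcc : G0.2 = c0 ∧ (h1 :: t1).map Prod.snd
          = pvDiffs (c0 :: cs) ++ [(state.length : Int) - (c0 :: cs).getLastD 0] := by
        have h5 := hcounts
        simp only [List.map_cons, pvCounts, List.cons.injEq] at h5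
        exact ⟨h5.1, by rw [List.map_cons, h5.2]⟩
      have hc02 : G0.2 = c0 := hcc.1
      have hctail := hcc.2
      have hlast2 : ((h1 :: t1) : List (Int × Int)).getLast? = some (v, c) := by
        rw [← hlast]; rfl
      have hceq : c = (state.length : Int) - (c0 :: cs).getLastD 0 := by
        have h6 : ((h1 :: t1).map Prod.snd).getLast? = some c := by
          rw [List.getLast?_map, hlast2]; rfl
        rw [hctail, List.getLast?_concat, Option.some_inj] at h6
        exact h6.symm
      by_cases heq : state.headD 0 = state.getLastD 0
      · rw [if_pos heq]
        have hmg : pvMerge (G0 :: h1 :: t1) = (G0.1, G0.2 + c) :: (h1 :: t1).dropLast := by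
          rw [pvMerge, if_pos ⟨by simp, by rw [hGlast]; rw [show ((G0 :: h1 :: t1).headD (0,0)).1
              = G0.1 from rfl] at hGhead ⊢; rw [hGhead, heq, hv]⟩, hGlast]
        rw [hmg, pv_map_pvF]
        congr 1
        simp only [List.map_cons, List.map_dropLast, hctail, List.dropLast_concat,
          List.headD_cons]
        rw [hc02, hceq]
      · rw [if_neg heq]
        have hmg : pvMerge (G0 :: h1 :: t1) = G0 :: h1 :: t1 := by
          rw [pvMerge, if_neg]
          rintro ⟨h1x, h2x⟩
          rw [hGlast] at h2x
          have h2x' : G0.1 = v := by simpa using h2x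
          exact heq ((hhead.symm.trans h2x').trans hv)
        rw [hmg, pv_map_pvF]
        congr 1

-- ===== VERDICT =====
theorem label_spec : Claim_equal_label := by
  intro state _ hpre
  unfold Spec_label
  exact (pv_label_eq_groups state hpre).trans (pv_groups_eq_alt state hpre)
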